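-- pv_equiv track=rewrite | github.com/sapienzauser420/sapienzastudentsnetwork.github.io | _scripts/scrape-classroom-timetables.py | merge_time_slots
-- ===== SOURCE A (Python) =====
-- def merge_time_slots(normalized_schedule):
--     if not normalized_schedule:
--         return {}
--     half_hour_slots = list(next(iter(normalized_schedule.values())).keys())
--     new_schedule = {day: {} for day in normalized_schedule}
--     i = 0
--     while i < len(half_hour_slots):
--         slot1 = half_hour_slots[i]
--         if i + 1 < len(half_hour_slots):
--             slot2 = half_hour_slots[i+1]
--             can_merge = True
--             for day in normalized_schedule:
--                 v1, v2 = normalized_schedule[day][slot1], normalized_schedule[day][slot2]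
--                 if not ((v1 == "" and v2 == "") or (v1 == v2 and v1 != "")):
--                     can_merge = False
--                     break
--             if can_merge:
--                 merged = f"{slot1.split('-')[0]}-{slot2.split('-')[1]}"
--                 for day in normalized_schedule:
--                     new_schedule[day][merged] = normalized_schedule[day][slot1] or normalized_schedule[day][slot2]
--                 i += 2
--             else:
--                 for day in normalized_schedule:
--                     new_schedule[day][slot1] = normalized_schedule[day][slot1]
--                     new_schedule[day][slot2] = normalized_schedule[day][slot2]
--                 i += 2
--         else:
--             for day in normalized_schedule:
--                 new_schedule[day][slot1] = normalized_schedule[day][slot1]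
--             i += 1
--     return new_schedule
-- ===== SOURCE B (Python) =====
-- def merge_time_slots(normalized_schedule):
--     if not normalized_schedule:
--         return {}
--     days = list(normalized_schedule)
--     slots = list(next(iter(normalized_schedule.values())).keys())
--     # Transpose: one column (slot, per-day value vector) per slot.
--     cols = [(s, [normalized_schedule[d][s] for d in days]) for s in slots]
--     # Merge each adjacent column pair whose value vectors are identical:
--     # the per-day test ((both "") or (equal and nonempty)) is exactly v1 == v2,
--     # and the merged vector ('v1 or v2' per day) is then the first vector.
--     merged = _merge_cols(cols)
--     # Transpose back.
--     return {d: {name: vec[i] for name, vec in merged} for i, d in enumerate(days)}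
--
-- def _merge_cols(cols):
--     out = []
--     while len(cols) >= 2:
--         (s1, v1), (s2, v2), cols = cols[0], cols[1], cols[2:]
--         if v1 == v2:
--             out.append((f"{s1.split('-')[0]}-{s2.split('-')[1]}", v1))
--         else:
--             out.append((s1, v1))
--             out.append((s2, v2))
--     out.extend(cols)
--     return out
-- ===== Notes on version B (the rewrite author's own statement) =====
-- stated objective: alternative
-- what changed: B transposes the schedule into per-slot columns and merges an adjacent column pair with a single whole-vector equality test (observing that the per-day predicate '(both empty) or (equal and nonempty)' is exactly v1 == v2, and that the merged per-day value 'v1 or v2' is then just the first column's vector), then transposes back; A instead runs a per-day compatibility loop with early break and mutates every day's dict inside its slot loop.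
import Mathlib
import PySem

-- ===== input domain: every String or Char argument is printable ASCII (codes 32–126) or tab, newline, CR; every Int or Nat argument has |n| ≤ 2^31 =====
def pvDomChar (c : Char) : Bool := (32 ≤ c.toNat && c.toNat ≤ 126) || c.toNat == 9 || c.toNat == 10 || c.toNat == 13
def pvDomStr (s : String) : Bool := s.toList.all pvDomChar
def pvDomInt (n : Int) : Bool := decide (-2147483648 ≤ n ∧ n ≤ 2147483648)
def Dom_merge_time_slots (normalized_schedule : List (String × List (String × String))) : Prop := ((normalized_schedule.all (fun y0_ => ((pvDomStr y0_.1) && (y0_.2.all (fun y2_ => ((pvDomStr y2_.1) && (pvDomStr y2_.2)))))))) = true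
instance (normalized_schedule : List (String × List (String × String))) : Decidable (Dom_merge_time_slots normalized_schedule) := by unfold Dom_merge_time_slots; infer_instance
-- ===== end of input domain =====

-- B is a different algorithm: it transposes the schedule into per-slot columns, merges an
-- adjacent column pair by ONE whole-vector equality test (the per-day compatibility predicate
-- is exactly v1 == v2, and the merged per-day value 'v1 or v2' is then the first vector),
-- and transposes back (objective: alternative, same cost).

-- ===== PORT A =====
-- normalized_schedule[day][slot]; the KeyError (missing slot) case is excluded by Pre_
def pvFetchA (sched : List (String × String)) (s : String) : String :=
  (PySem.Dict.mk sched).getD s ""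

-- the can_merge day loop with its early break
def pvCanMergeA (ns : List (String × List (String × String))) (s1 s2 : String) : Bool :=
  match ns with
  | [] => true
  | p :: rest =>
    let v1 := pvFetchA p.2 s1
    let v2 := pvFetchA p.2 s2
    if !((v1 == "" && v2 == "") || (v1 == v2 && v1 != "")) then false
    else pvCanMergeA rest s1 s2

-- f"{slot1.split('-')[0]}-{slot2.split('-')[1]}"; the [1] IndexError case is excluded by Pre_
def pvMergedNameA (s1 s2 : String) : String :=
  PySem.Str.join "-" [((PySem.Str.split? s1 "-").getD []).getD 0 "",
                      ((PySem.Str.split? s2 "-").getD []).getD 1 ""]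

-- new_schedule[day][k] = v  (day is always an initialised key of new_schedule)
def pvUpdA (st : PySem.Dict String (PySem.Dict String String)) (day k v : String) :
    PySem.Dict String (PySem.Dict String String) :=
  st.insert day ((st.getD day PySem.Dict.empty).insert k v)

-- the while loop over half_hour_slots; 'for day in normalized_schedule' with the
-- normalized_schedule[day] lookups is ported as iterating the (day, sched) items,
-- exact for a Python dict (unique keys)
def pvLoopA (ns : List (String × List (String × String))) :
    List String → PySem.Dict String (PySem.Dict String String) →
    PySem.Dict String (PySem.Dict String String)
  | [], st => st
  | [s1], st => ns.foldl (fun st p => pvUpdA st p.1 s1 (pvFetchA p.2 s1)) st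
  | s1 :: s2 :: rest, st =>
    if pvCanMergeA ns s1 s2 then
      pvLoopA ns rest (ns.foldl (fun st p =>
        pvUpdA st p.1 (pvMergedNameA s1 s2)
          (let v1 := pvFetchA p.2 s1; if v1 != "" then v1 else pvFetchA p.2 s2)) st)
    else
      pvLoopA ns rest (ns.foldl (fun st p =>
        pvUpdA (pvUpdA st p.1 s1 (pvFetchA p.2 s1)) p.1 s2 (pvFetchA p.2 s2)) st)

def merge_time_slots (normalized_schedule : List (String × List (String × String))) : List (String × List (String × String)) :=
  match normalized_schedule with
  | [] => []
  | (_, row0) :: _ =>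
    let half_hour_slots := row0.map Prod.fst
    let init : PySem.Dict String (PySem.Dict String String) :=
      normalized_schedule.foldl (fun st p => st.insert p.1 PySem.Dict.empty) PySem.Dict.empty
    ((pvLoopA normalized_schedule half_hour_slots init).items).map (fun p => (p.1, p.2.items))

-- ===== PORT B =====
-- sched[slot]; the KeyError case is excluded by Pre_
def pvGetB (sched : List (String × String)) (s : String) : String :=
  (PySem.Dict.mk sched).getD s ""

def pvNameB (s1 s2 : String) : String :=
  PySem.Str.join "-" [((PySem.Str.split? s1 "-").getD []).getD 0 "",
                      ((PySem.Str.split? s2 "-").getD []).getD 1 ""]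

-- _merge_cols: the while loop eating two columns per step, plus the trailing out.extend(cols)
def pvMergeCols : List (String × List String) → List (String × List String)
  | c1 :: c2 :: rest =>
    (if c1.2 == c2.2 then [(pvNameB c1.1 c2.1, c1.2)] else [c1, c2]) ++ pvMergeCols rest
  | [c] => [c]
  | [] => []

def merge_time_slots_alt (normalized_schedule : List (String × List (String × String))) : List (String × List (String × String)) :=
  match normalized_schedule with
  | [] => []
  | (_, row0) :: _ =>
    -- transpose into columns, merge equal adjacent columns, transpose back
    let cols := (row0.map Prod.fst).map
      (fun s => (s, normalized_schedule.map (fun p => pvGetB p.2 s)))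
    let merged := pvMergeCols cols
    (((normalized_schedule.zipIdx).foldl
        (fun nd q => nd.insert q.1.1
          (merged.foldl (fun r c => r.insert c.1 (c.2.getD q.2 "")) PySem.Dict.empty))
        (PySem.Dict.empty : PySem.Dict String (PySem.Dict String String))).items).map
      (fun p => (p.1, p.2.items))

-- ===== PRECONDITION & SPEC =====
-- the slot list A reads off the first day
def pvSlots0 (ns : List (String × List (String × String))) : List String :=
  (((ns.head?).map Prod.snd).getD []).map Prod.fst

-- one slot pair of A's fixed pairing: both slots present in every day (else KeyError), and if
-- the pair is compatible everywhere the second slot must contain '-' (else IndexError on split)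
def pvPairOK (ns : List (String × List (String × String))) (s1 s2 : String) : Prop :=
  (∀ p ∈ ns, (PySem.Dict.mk p.2).contains s1 = true ∧ (PySem.Dict.mk p.2).contains s2 = true) ∧
  ((∀ p ∈ ns, ((PySem.Dict.mk p.2).getD s1 "" = "" ∧ (PySem.Dict.mk p.2).getD s2 "" = "") ∨
      ((PySem.Dict.mk p.2).getD s1 "" = (PySem.Dict.mk p.2).getD s2 "" ∧
       (PySem.Dict.mk p.2).getD s1 "" ≠ "")) →
    PySem.Str.isIn "-" s2 = true)

-- Pre_ = exactly the inputs where Python A returns: every processed slot pair satisfies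
-- pvPairOK and an odd trailing slot is present in every day.  The Nodup conjunct excludes
-- only duplicate day keys, which cannot arise from a Python dict.
def Pre_merge_time_slots (normalized_schedule : List (String × List (String × String))) : Prop :=
  (normalized_schedule.map Prod.fst).Nodup ∧
  (∀ k < (pvSlots0 normalized_schedule).length, 2 * k + 1 < (pvSlots0 normalized_schedule).length →
    pvPairOK normalized_schedule ((pvSlots0 normalized_schedule).getD (2 * k) "")
      ((pvSlots0 normalized_schedule).getD (2 * k + 1) "")) ∧
  ((pvSlots0 normalized_schedule).length % 2 = 1 →
    ∀ p ∈ normalized_schedule, (PySem.Dict.mk p.2).contains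
      ((pvSlots0 normalized_schedule).getD ((pvSlots0 normalized_schedule).length - 1) "") = true)

instance (normalized_schedule : List (String × List (String × String))) : Decidable (Pre_merge_time_slots normalized_schedule) := by
  unfold Pre_merge_time_slots pvPairOK; infer_instance

def pvWitness_merge_time_slots : (List (String × List (String × String))) :=
  [("Mon", [("08:00-08:30", "x"), ("08:30-09:00", "x")]),
   ("Tue", [("08:00-08:30", ""), ("08:30-09:00", "y")])]

def Spec_merge_time_slots (normalized_schedule : List (String × List (String × String))) (out : List (String × List (String × String))) : Prop := out = merge_time_slots_alt normalized_schedule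
instance (normalized_schedule : List (String × List (String × String))) (out : List (String × List (String × String))) : Decidable (Spec_merge_time_slots normalized_schedule out) := by unfold Spec_merge_time_slots; infer_instance

-- ===== CLAIM (what is proved, stated in full; the proofs are below) =====
def Claim_equal_merge_time_slots : Prop := ∀ (normalized_schedule : List (String × List (String × String))), Dom_merge_time_slots normalized_schedule → Pre_merge_time_slots normalized_schedule → Spec_merge_time_slots normalized_schedule (merge_time_slots normalized_schedule)

-- ===== LEMMAS AND PROOFS =====

-- proof-side intermediate: A's column plan (what each pass of A's while loop contributes)
inductive PvCol
  | merge (name s1 s2 : String)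
  | copy (s : String)
deriving DecidableEq, Repr

def pvCompatB (ns : List (String × List (String × String))) (s1 s2 : String) : Bool :=
  ns.all (fun p =>
    let v1 := pvGetB p.2 s1
    let v2 := pvGetB p.2 s2
    (v1 == "" && v2 == "") || (v1 == v2 && v1 != ""))

def pvPlanB (ns : List (String × List (String × String))) : List String → List PvCol
  | s1 :: s2 :: rest =>
    (if pvCompatB ns s1 s2 then [PvCol.merge (pvNameB s1 s2) s1 s2]
     else [PvCol.copy s1, PvCol.copy s2]) ++ pvPlanB ns rest
  | [s] => [PvCol.copy s]
  | [] => []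

def pvColApp (sched : List (String × String)) (r : PySem.Dict String String) (c : PvCol) :
    PySem.Dict String String :=
  match c with
  | PvCol.merge name s1 s2 =>
      r.insert name (let v1 := pvGetB sched s1; if v1 != "" then v1 else pvGetB sched s2)
  | PvCol.copy s => r.insert s (pvGetB sched s)

-- the two sides read a day's dict identically
theorem pvFetchA_eq : @pvFetchA = @pvGetB := rfl

-- A's early-break can_merge loop is the all(...) predicate
theorem pvCanMergeA_eq (ns : List (String × List (String × String))) (s1 s2 : String) :
    pvCanMergeA ns s1 s2 = pvCompatB ns s1 s2 := by
  induction ns with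
  | nil => rfl
  | cons p rest ih =>
    simp only [pvCanMergeA, pvCompatB, List.all_cons] at *
    by_cases h : ((pvFetchA p.2 s1 == "" && pvFetchA p.2 s2 == "") ||
        (pvFetchA p.2 s1 == pvFetchA p.2 s2 && pvFetchA p.2 s1 != "")) = true
    · simp [pvFetchA_eq ▸ h, ih, pvFetchA_eq]
    · simp only [Bool.not_eq_true] at h
      simp [pvFetchA_eq ▸ h, pvFetchA_eq]

-- the per-day compatibility predicate is exactly equality of the two values
theorem pvDayCompat (v1 v2 : String) :
    ((v1 == "" && v2 == "") || (v1 == v2 && v1 != "")) = (v1 == v2) := by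
  by_cases h : v1 = v2
  · subst h
    by_cases h2 : v1 = "" <;> simp [h2]
  · have hb : (v1 == v2) = false := by simp [h]
    have hb2 : (v1 == "" && v2 == "") = false := by
      by_cases h1 : v1 = "" <;> by_cases h2 : v2 = "" <;>
        first
        | exact absurd (h1.trans h2.symm) h
        | simp [h1, h2]
    simp [hb, hb2]

-- hence compatibility is equality of the two whole columns
theorem pvCompat_iff (ns : List (String × List (String × String))) (s1 s2 : String) :
    pvCompatB ns s1 s2
      = ((ns.map (fun p => pvGetB p.2 s1)) == (ns.map (fun p => pvGetB p.2 s2))) := by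
  rw [Bool.eq_iff_iff, beq_iff_eq, List.map_inj_left]
  simp [pvCompatB, pvDayCompat]

-- filling one day's row from the merged columns = applying A's plan to that day
set_option maxHeartbeats 1000000 in
theorem pvRow_eq_plan (ns : List (String × List (String × String))) (i : Nat)
    (hi : i < ns.length) (slots : List String) :
    ∀ r : PySem.Dict String String,
      (pvMergeCols (slots.map (fun s => (s, ns.map (fun p => pvGetB p.2 s))))).foldl
          (fun r c => r.insert c.1 (c.2.getD i "")) r
        = (pvPlanB ns slots).foldl (pvColApp (ns[i]'hi).2) r := by
  have hval : ∀ (s : String), (ns.map (fun p => pvGetB p.2 s)).getD i "" = pvGetB (ns[i]'hi).2 s := by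
    intro s
    rw [List.getD_eq_getElem _ _ (by simpa using hi), List.getElem_map]
  induction slots using pvPlanB.induct with
  | case3 => intro r; rfl
  | case2 s =>
    intro r
    simp only [List.map_cons, List.map_nil, pvMergeCols, pvPlanB, List.foldl_cons,
      List.foldl_nil, pvColApp]
    rw [hval]
  | case1 s1 s2 rest ih =>
    intro r
    simp only [List.map_cons, pvMergeCols, pvPlanB]
    rw [pvCompat_iff]
    by_cases h : ((ns.map (fun p => pvGetB p.2 s1)) == (ns.map (fun p => pvGetB p.2 s2))) = true
    · have hv12 : pvGetB (ns[i]'hi).2 s1 = pvGetB (ns[i]'hi).2 s2 := by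
        rw [← hval s1, ← hval s2, beq_iff_eq.mp h]
      rw [if_pos h, if_pos h]
      simp only [List.singleton_append, List.foldl_cons]
      rw [ih]
      have hacc : r.insert (pvNameB s1 s2) ((ns.map (fun p => pvGetB p.2 s1)).getD i "")
          = pvColApp (ns[i]'hi).2 r (PvCol.merge (pvNameB s1 s2) s1 s2) := by
        simp only [pvColApp]
        rw [hval]
        by_cases h0 : pvGetB (ns[i]'hi).2 s1 = "" <;> simp [h0, ← hv12]
      rw [hacc]
    · rw [if_neg h, if_neg h]
      simp only [List.cons_append, List.nil_append, List.foldl_cons]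
      rw [ih]
      have hacc : (r.insert s1 ((ns.map (fun p => pvGetB p.2 s1)).getD i "")).insert s2
            ((ns.map (fun p => pvGetB p.2 s2)).getD i "")
          = pvColApp (ns[i]'hi).2 (pvColApp (ns[i]'hi).2 r (PvCol.copy s1)) (PvCol.copy s2) := by
        simp only [pvColApp]
        rw [hval, hval]
      rw [hacc]

theorem mk_get?_middle {ν : Type} (pre post : List (String × ν)) (k : String) (v : ν)
    (hpre : k ∉ pre.map Prod.fst) :
    (PySem.Dict.mk (pre ++ (k, v) :: post)).get? k = some v := by
  induction pre with
  | nil => simp [PySem.Dict.get?_mk_cons]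
  | cons q rest ih =>
    simp only [List.map_cons, List.mem_cons, not_or] at hpre
    rw [List.cons_append, PySem.Dict.get?_mk_cons]
    simp only [beq_iff_eq]
    rw [if_neg (by exact fun h => hpre.1 h.symm)]
    exact ih hpre.2

theorem mk_insert_middle {ν : Type} (pre post : List (String × ν)) (k : String) (v w : ν)
    (hpre : k ∉ pre.map Prod.fst) (hpost : k ∉ post.map Prod.fst) :
    (PySem.Dict.mk (pre ++ (k, v) :: post)).insert k w = PySem.Dict.mk (pre ++ (k, w) :: post) := by
  have hmap : ∀ (l : List (String × ν)), k ∉ l.map Prod.fst →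
      l.map (fun p => if (p.1 == k) = true then (k, w) else p) = l := by
    intro l hl
    have h2 : ∀ p ∈ l, (if (p.1 == k) = true then (k, w) else p) = id p := by
      intro p hp
      rw [if_neg]
      · rfl
      · simp only [beq_iff_eq]
        exact fun h => hl (h ▸ List.mem_map_of_mem hp)
    rw [List.map_congr_left h2, List.map_id]
  have hc : (PySem.Dict.mk (pre ++ (k, v) :: post)).contains k = true := by
    simp [PySem.Dict.contains]
  apply PySem.Dict.ext
  rw [PySem.Dict.items_insert_of_contains _ _ hc]
  show (pre ++ (k, v) :: post).map _ = _
  rw [List.map_append, List.map_cons, hmap pre hpre, hmap post hpost, if_pos (by simp)]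

theorem foldl_upd (f : (String × List (String × String)) → PySem.Dict String String → PySem.Dict String String)
    (l : List (String × List (String × String))) (pre : List (String × PySem.Dict String String))
    (g : (String × List (String × String)) → PySem.Dict String String)
    (hnd : (l.map Prod.fst).Nodup) (hdisj : ∀ p ∈ l, p.1 ∉ pre.map Prod.fst) :
    l.foldl (fun st p => st.insert p.1 (f p (st.getD p.1 PySem.Dict.empty)))
        (PySem.Dict.mk (pre ++ l.map (fun p => (p.1, g p))))
      = PySem.Dict.mk (pre ++ l.map (fun p => (p.1, f p (g p)))) := by
  induction l generalizing pre with
  | nil => rfl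
  | cons p l' ih =>
    simp only [List.map_cons, List.nodup_cons] at hnd
    have hp1pre : p.1 ∉ pre.map Prod.fst := hdisj p (List.mem_cons_self ..)
    have hp1l' : p.1 ∉ (l'.map (fun p => (p.1, g p))).map Prod.fst := by
      rw [List.map_map]; exact hnd.1
    have hget : (PySem.Dict.mk (pre ++ (p.1, g p) :: l'.map (fun p => (p.1, g p)))).getD p.1 PySem.Dict.empty = g p := by
      rw [PySem.Dict.getD_eq_get?_getD, mk_get?_middle _ _ _ _ hp1pre]; rfl
    simp only [List.foldl_cons, List.map_cons]
    rw [hget, mk_insert_middle _ _ _ _ _ hp1pre hp1l']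
    have hre : pre ++ (p.1, f p (g p)) :: l'.map (fun p => (p.1, g p))
        = (pre ++ [(p.1, f p (g p))]) ++ l'.map (fun p => (p.1, g p)) := by
      simp
    have hdisj' : ∀ q ∈ l', q.1 ∉ (pre ++ [(p.1, f p (g p))]).map Prod.fst := by
      intro q hq hmem
      rw [List.map_append] at hmem
      rcases List.mem_append.mp hmem with h | h
      · exact hdisj q (List.mem_cons_of_mem _ hq) h
      · simp only [List.map_cons, List.map_nil, List.mem_singleton] at h
        exact hnd.1 (h ▸ List.mem_map_of_mem hq)
    rw [hre, ih (pre ++ [(p.1, f p (g p))]) hnd.2 hdisj']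
    simp

theorem pvUpdA_pvUpdA (st : PySem.Dict String (PySem.Dict String String)) (d k1 v1 k2 v2 : String) :
    pvUpdA (pvUpdA st d k1 v1) d k2 v2
      = st.insert d (((st.getD d PySem.Dict.empty).insert k1 v1).insert k2 v2) := by
  simp [pvUpdA, PySem.Dict.getD_insert_self, PySem.Dict.insert_insert_self]

theorem pvLoopA_eq (ns : List (String × List (String × String)))
    (hnd : (ns.map Prod.fst).Nodup) (slots : List String) :
    ∀ g : (String × List (String × String)) → PySem.Dict String String,
    pvLoopA ns slots (PySem.Dict.mk (ns.map (fun p => (p.1, g p))))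
      = PySem.Dict.mk (ns.map (fun p => (p.1, (pvPlanB ns slots).foldl (pvColApp p.2) (g p)))) := by
  induction slots using pvPlanB.induct with
  | case3 => intro g; simp [pvLoopA, pvPlanB]
  | case2 s =>
    intro g
    simp only [pvLoopA, pvPlanB, pvUpdA]
    have h1 := foldl_upd (fun p r => r.insert s (pvFetchA p.2 s)) ns [] g hnd (by simp)
    simp only [List.nil_append] at h1
    rw [h1]
    simp [pvColApp, pvFetchA, pvGetB]
  | case1 s1 s2 rest ih =>
    intro g
    simp only [pvLoopA, pvPlanB, pvCanMergeA_eq]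
    by_cases h : pvCompatB ns s1 s2 = true
    · rw [if_pos h, if_pos h]
      simp only [pvUpdA]
      have h1 := foldl_upd
        (fun p r => r.insert (pvMergedNameA s1 s2)
          (let v1 := pvFetchA p.2 s1; if v1 != "" then v1 else pvFetchA p.2 s2)) ns [] g hnd (by simp)
      simp only [List.nil_append] at h1
      rw [h1, ih (fun p => (g p).insert (pvMergedNameA s1 s2)
          (let v1 := pvFetchA p.2 s1; if v1 != "" then v1 else pvFetchA p.2 s2))]
      rfl
    · rw [if_neg h, if_neg h]
      simp only [pvUpdA_pvUpdA]
      have h1 := foldl_upd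
        (fun p r => (r.insert s1 (pvFetchA p.2 s1)).insert s2 (pvFetchA p.2 s2)) ns [] g hnd (by simp)
      simp only [List.nil_append] at h1
      rw [h1, ih (fun p => ((g p).insert s1 (pvFetchA p.2 s1)).insert s2 (pvFetchA p.2 s2))]
      rfl

theorem foldl_insert_eq_mk {α β : Type} (l : List α) (key : α → String) (v : α → β)
    (hnd : (l.map key).Nodup) :
    l.foldl (fun d p => d.insert (key p) (v p)) PySem.Dict.empty
      = PySem.Dict.mk (l.map (fun p => (key p, v p))) := by
  apply PySem.Dict.ext
  rw [PySem.Dict.items_foldl_insert_fresh l key (fun p => v p) PySem.Dict.empty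
      (fun a _ => PySem.Dict.contains_empty ..) hnd]
  rfl

theorem zipIdx_map_key (ns : List (String × List (String × String))) :
    ∀ k : Nat, ((ns.zipIdx k).map (fun q => q.1.1)) = ns.map Prod.fst := by
  induction ns with
  | nil => intro k; rfl
  | cons p rest ih => intro k; simp [List.zipIdx, ih]

-- ===== VERDICT (by name: the statement is the Claim_ definition above) =====
theorem merge_time_slots_spec : Claim_equal_merge_time_slots := by
  intro ns hdom hpre
  unfold Spec_merge_time_slots
  obtain ⟨hnd, -, -⟩ := hpre
  cases ns with
  | nil => rfl
  | cons hd tl =>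
    obtain ⟨d0, row0⟩ := hd
    simp only [merge_time_slots, merge_time_slots_alt]
    rw [foldl_insert_eq_mk ((d0, row0) :: tl) Prod.fst (fun _ => PySem.Dict.empty)
          (by simpa using hnd),
        pvLoopA_eq ((d0, row0) :: tl) hnd (row0.map Prod.fst) (fun _ => PySem.Dict.empty),
        foldl_insert_eq_mk (((d0, row0) :: tl).zipIdx) (fun q => q.1.1)
          (fun q => (pvMergeCols ((row0.map Prod.fst).map
              (fun s => (s, ((d0, row0) :: tl).map (fun p => pvGetB p.2 s))))).foldl
            (fun r c => r.insert c.1 (c.2.getD q.2 "")) PySem.Dict.empty)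
          (by rw [zipIdx_map_key]; exact hnd)]
    have hlist : ((d0, row0) :: tl).map (fun p => (p.1,
          (pvPlanB ((d0, row0) :: tl) (row0.map Prod.fst)).foldl (pvColApp p.2) PySem.Dict.empty))
        = (((d0, row0) :: tl).zipIdx).map (fun q => (q.1.1,
          (pvMergeCols ((row0.map Prod.fst).map
              (fun s => (s, ((d0, row0) :: tl).map (fun p => pvGetB p.2 s))))).foldl
            (fun r c => r.insert c.1 (c.2.getD q.2 "")) PySem.Dict.empty)) := by
      apply List.ext_getElem
      · simp
      · intro i h1 h2
        have hi : i < ((d0, row0) :: tl).length := by simpa using h1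
        simp only [List.getElem_map, List.getElem_zipIdx, Nat.zero_add]
        rw [pvRow_eq_plan ((d0, row0) :: tl) i hi (row0.map Prod.fst) PySem.Dict.empty]
    rw [hlist]
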